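-- pv_equiv track=rewrite | github.com/fbchh/likou_alg | code_sx_thd/code_sx_str7_rplcsubstr.py | solve
-- ===== SOURCE A (Python) =====
-- def solve(s):
--     if len(s) == 1:
--         return False
--
--     new_s = s + s
--     new_s = new_s[1:-1]
--
--     s_len = len(s)
--     for i in range(len(new_s)):
--         if new_s[i:i + s_len] == s:
--             return True
--
--     return False
-- ===== SOURCE B (Python) =====
-- def solve(s):
--     n = len(s)
--     for d in range(1, n):
--         if n % d == 0 and s[:d] * (n // d) == s:
--             return True
--     return False
-- ===== Notes on version B (the rewrite author's own statement) =====
-- stated objective: faster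
-- what changed: Instead of scanning all ~2n windows of the doubled string (s+s)[1:-1] for an occurrence of s, B checks for each proper divisor d of n whether s equals s[:d] repeated n//d times, using the fact that s occurs nontrivially in its doubled self iff s is a repetition of a proper-divisor-length prefix.
import Mathlib
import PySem

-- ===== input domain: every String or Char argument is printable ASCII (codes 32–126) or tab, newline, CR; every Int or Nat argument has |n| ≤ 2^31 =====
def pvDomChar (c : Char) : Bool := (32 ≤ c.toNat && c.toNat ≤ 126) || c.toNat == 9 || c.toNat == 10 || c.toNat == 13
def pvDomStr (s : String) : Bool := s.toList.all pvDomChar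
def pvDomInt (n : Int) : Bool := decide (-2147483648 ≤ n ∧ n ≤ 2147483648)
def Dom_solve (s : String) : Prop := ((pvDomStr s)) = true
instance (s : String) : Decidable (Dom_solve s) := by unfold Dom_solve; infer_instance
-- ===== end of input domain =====

-- B replaces A's scan of s inside (s+s)[1:-1] by a check of the proper divisors d of
-- n = len(s): s is a nontrivial rotation of itself iff s == s[:d] * (n//d) for some such d.

-- ===== PORT A =====
def solve (s : String) : Bool :=
  if PySem.Str.len s = 1 then false
  else
    let new_s : List Char := PySem.List.slice (s.toList ++ s.toList) (some 1) (some (-1))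
    let s_len : Int := PySem.Str.len s
    (PySem.List.pyRange 0 (new_s.length : Int)).any fun i =>
      PySem.List.slice new_s (some i) (some (i + s_len)) == s.toList

-- ===== PORT B =====
def solve_alt (s : String) : Bool :=
  let n : Int := PySem.Str.len s
  (PySem.List.pyRange 1 n).any fun d =>
    PySem.Int.mod n d == 0 &&
      PySem.List.pyRepeat (PySem.List.slice s.toList none (some d)) (PySem.Int.floordiv n d) == s.toList

-- ===== PRECONDITION & SPEC =====
def Spec_solve (s : String) (out : Bool) : Prop := out = solve_alt s
instance (s : String) (out : Bool) : Decidable (Spec_solve s out) := by unfold Spec_solve; infer_instance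

-- ===== CLAIM (what is proved, stated in full; the proofs are below) =====
def Claim_equal_solve : Prop := ∀ (s : String), Dom_solve s → Spec_solve s (solve s)

-- ===== LEMMAS AND PROOFS =====

-- a rotation fixing l is fixed by all its multiples
theorem rotate_mul_self {α : Type} (l : List α) (k : ℕ) (h : l.rotate k = l) :
    ∀ t : ℕ, l.rotate (t * k) = l := by
  intro t
  induction t with
  | zero => simp
  | succ t ih =>
    have h2 : l.rotate (t * k + k) = l := by rw [← List.rotate_rotate, ih, h]
    simpa [Nat.succ_mul] using h2

-- Bézout: some multiple of k is congruent to gcd k n mod n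
theorem exists_mul_mod_eq_gcd (k n : ℕ) (hn : 0 < n) :
    ∃ t : ℕ, (t * k) % n = Nat.gcd k n % n := by
  have hb := Nat.gcd_eq_gcd_ab k n
  set A := Nat.gcdA k n
  set B := Nat.gcdB k n
  refine ⟨(A % (n : ℤ)).toNat, ?_⟩
  have hA : ((A % (n:ℤ)).toNat : ℤ) = A % (n:ℤ) :=
    Int.toNat_of_nonneg (Int.emod_nonneg A (by omega))
  have key : (((A % (n:ℤ)).toNat * k : ℕ) : ℤ) % (n:ℤ) = ((Nat.gcd k n : ℕ) : ℤ) % (n:ℤ) := by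
    push_cast
    rw [hA, Int.mul_emod, Int.emod_emod_of_dvd _ dvd_rfl, ← Int.mul_emod,
      mul_comm A ((k:ℤ)), hb]
    simp [Int.add_mul_emod_self_left]
  have h2 : (((A % (n:ℤ)).toNat * k : ℕ) % n : ℤ) = ((Nat.gcd k n % n : ℕ) : ℤ) := by
    push_cast
    exact key
  exact_mod_cast h2

-- a fixing rotation by k ∈ (0, |l|) gives a fixing rotation by gcd k |l|
theorem rotate_gcd_self {α : Type} (l : List α) (k : ℕ) (hk : 0 < k)
    (hkn : k < l.length) (h : l.rotate k = l) :
    l.rotate (Nat.gcd k l.length) = l := by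
  have hn : 0 < l.length := by omega
  obtain ⟨t, ht⟩ := exists_mul_mod_eq_gcd k l.length hn
  have hg : Nat.gcd k l.length % l.length = Nat.gcd k l.length :=
    Nat.mod_eq_of_lt (lt_of_le_of_lt (Nat.le_of_dvd hk (Nat.gcd_dvd_left _ _)) hkn)
  calc l.rotate (Nat.gcd k l.length)
      = l.rotate (Nat.gcd k l.length % l.length) := by rw [hg]
    _ = l.rotate (t * k % l.length) := by rw [ht]
    _ = l.rotate (t * k) := List.rotate_mod l _
    _ = l := rotate_mul_self l k h t

-- a list fixed by rotation by g, of length m*g, is m copies of its g-prefix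
theorem eq_flatten_replicate_of_rotate {α : Type} (g : ℕ) :
    ∀ (m : ℕ) (l : List α), l.length = m * g → l.drop g ++ l.take g = l →
      l = (List.replicate m (l.take g)).flatten := by
  intro m
  induction m with
  | zero =>
    intro l hlen _
    have : l = [] := List.length_eq_zero_iff.mp (by simpa using hlen)
    rw [this]; simp
  | succ m ih =>
    intro l hlen hrot
    have hgle : g ≤ l.length := by rw [hlen]; nlinarith
    have hw : (l.take g).length = g := by simp [hgle]
    have hl : l = l.take g ++ l.drop g := (List.take_append_drop g l).symm
    have hlen' : (l.drop g).length = m * g := by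
      rw [List.length_drop, hlen, Nat.succ_mul, Nat.add_sub_cancel]
    rcases Nat.eq_zero_or_pos m with hm | hm
    · subst hm
      have hnil : l.drop g = [] := List.length_eq_zero_iff.mp (by simpa using hlen')
      rw [List.replicate_one]
      simpa [hnil] using hl
    · have hgle' : g ≤ (l.drop g).length := by rw [hlen']; exact Nat.le_mul_of_pos_left g hm
      have htk : (l.drop g).take g = l.take g := by
        have h0 : (l.drop g ++ l.take g).take g = (l.drop g).take g :=
          List.take_append_of_le_length hgle'
        rw [hrot] at h0; exact h0.symm
      have hcomm : l.take g ++ l.drop g = l.drop g ++ l.take g := by rw [hrot, ← hl]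
      have hrot' : (l.drop g).drop g ++ (l.drop g).take g = l.drop g := by
        have hd1 : (l.take g ++ l.drop g).drop g = l.drop g := List.drop_left' hw
        have hd2 : (l.drop g ++ l.take g).drop g = (l.drop g).drop g ++ l.take g :=
          List.drop_append_of_le_length hgle'
        rw [htk, ← hd2, ← hcomm, hd1]
      have hrec := ih (l.drop g) hlen' hrot'
      rw [htk] at hrec
      calc l = l.take g ++ l.drop g := hl
        _ = l.take g ++ (List.replicate m (l.take g)).flatten := by rw [← hrec]
        _ = (List.replicate (m+1) (l.take g)).flatten := by
              rw [List.replicate_succ, List.flatten_cons]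

-- converse: a repetition is fixed by rotating one block
theorem rotate_of_flatten_replicate {α : Type} (l : List α) (d : ℕ) (hd : 0 < d)
    (hdn : d < l.length)
    (h : (List.replicate (l.length / d) (l.take d)).flatten = l) :
    l.rotate d = l := by
  have hw : (l.take d).length = d := by simp; omega
  obtain ⟨m, hm⟩ : ∃ m, l.length / d = m + 1 := by
    have : 0 < l.length / d := Nat.div_pos (by omega) hd
    exact ⟨l.length / d - 1, by omega⟩
  rw [hm, List.replicate_succ, List.flatten_cons] at h
  have hrotapp := List.rotate_append_length_eq (l.take d) (List.replicate m (l.take d)).flatten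
  rw [hw] at hrotapp
  calc l.rotate d = (l.take d ++ (List.replicate m (l.take d)).flatten).rotate d := by rw [h]
    _ = (List.replicate m (l.take d)).flatten ++ l.take d := hrotapp
    _ = (List.replicate m (l.take d) ++ [l.take d]).flatten := by
          rw [List.flatten_append]; simp
    _ = (List.replicate (m+1) (l.take d)).flatten := by rw [← List.replicate_succ']
    _ = l := by rw [List.replicate_succ, List.flatten_cons, h]

-- s[1:-1] as drop/take
theorem slice_one_negone {α : Type} (xs : List α) :
    PySem.List.slice xs (some 1) (some (-1)) = (xs.drop 1).take (xs.length - 2) := by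
  simp only [PySem.List.slice, PySem.List.clampIdx]
  rcases Nat.eq_zero_or_pos xs.length with h | h
  · rw [List.length_eq_zero_iff.mp h]; simp
  · have h1 : ¬ ((1:ℤ) < 0) := by omega
    have h2 : ((-1:ℤ) < 0) := by omega
    have h3 : ¬ ((xs.length : ℤ) + (-1) < 0) := by omega
    simp only [if_neg h1, if_pos h2, if_neg h3]
    have h4 : min (1:ℤ).toNat xs.length = 1 := by omega
    have h5 : ((xs.length : ℤ) + (-1)).toNat = xs.length - 1 := by omega
    rw [h4, h5]
    congr 1

-- the window A compares at offset j, in drop/take form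
theorem rotate_mem_helper {α : Type} (l : List α) (j : ℕ) :
    PySem.List.slice (PySem.List.slice (l ++ l) (some 1) (some (-1))) (some (j : ℤ))
        (some ((j : ℤ) + (l.length : ℤ))) =
      ((l ++ l).drop (1 + j)).take (min l.length (2 * l.length - 2 - j)) := by
  rw [slice_one_negone, PySem.List.slice_natCast_add, List.drop_take, List.drop_drop,
    List.take_take]
  congr 2
  simp; omega

-- the first |l| elements of (l++l) after dropping k ≤ |l| form the rotation by k
theorem drop_append_take_eq_rotate {α : Type} (l : List α) (k : ℕ) (hk : k ≤ l.length) :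
    ((l ++ l).drop k).take l.length = l.rotate k := by
  rw [List.rotate_eq_drop_append_take hk, List.drop_append_of_le_length hk]
  have h1 : List.take l.length (l.drop k) = l.drop k := List.take_of_length_le (by simp)
  have h2 : l.length - (l.drop k).length = k := by simp; omega
  rw [List.take_append, h1, h2]

-- A returns true iff some rotation by k ∈ [1, n) fixes the string
theorem solve_iff_rotate (s : String) :
    solve s = true ↔ ∃ k : ℕ, 1 ≤ k ∧ k < s.toList.length ∧ s.toList.rotate k = s.toList := by
  unfold solve
  by_cases h1 : PySem.Str.len s = 1
  · rw [if_pos h1]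
    have hn1 : s.toList.length = 1 := by
      simp only [PySem.Str.len] at h1; exact_mod_cast h1
    simp only [Bool.false_eq_true, false_iff]
    rintro ⟨k, hk1, hkn, -⟩; omega
  · rw [if_neg h1]
    simp only [PySem.Str.len]
    have hNlen : (PySem.List.slice (s.toList ++ s.toList) (some 1) (some (-1))).length
        = 2 * s.toList.length - 2 := by
      rw [slice_one_negone]; simp; omega
    rw [hNlen, List.any_eq_true]
    constructor
    · rintro ⟨i, hmem, hpred⟩
      rw [PySem.List.mem_pyRange_one] at hmem
      obtain ⟨hi0, hiN⟩ := hmem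
      rw [beq_iff_eq] at hpred
      have hij : i = ((i.toNat : ℕ) : ℤ) := (Int.toNat_of_nonneg hi0).symm
      rw [hij, rotate_mem_helper] at hpred
      set j := i.toNat with hj
      set n := s.toList.length with hn
      have hjN : j < 2 * n - 2 := by omega
      by_cases hjc : j + 2 ≤ n
      · have hmin : min n (2 * n - 2 - j) = n := by omega
        rw [hmin] at hpred
        have hpred' : ((s.toList ++ s.toList).drop (1 + j)).take n = s.toList := hpred
        rw [drop_append_take_eq_rotate s.toList (1 + j) (by omega)] at hpred'
        exact ⟨1 + j, by omega, by omega, hpred'⟩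
      · exfalso
        have hlen := congrArg List.length hpred
        simp only [List.length_take, List.length_drop, List.length_append] at hlen
        omega
    · rintro ⟨k, hk1, hkn, hrot⟩
      set n := s.toList.length with hn
      refine ⟨((k - 1 : ℕ) : ℤ), ?_, ?_⟩
      · rw [PySem.List.mem_pyRange_one]
        constructor
        · positivity
        · exact_mod_cast (by omega : k - 1 < 2 * n - 2)
      · rw [beq_iff_eq, rotate_mem_helper]
        have hmin : min n (2 * n - 2 - (k - 1)) = n := by omega
        have hk' : 1 + (k - 1) = k := by omega
        rw [hmin, hk', drop_append_take_eq_rotate s.toList k (by omega)]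
        exact hrot

-- B returns true iff the string is (n/d) copies of its d-prefix for a proper divisor d
theorem solve_alt_iff_repeat (s : String) :
    solve_alt s = true ↔ ∃ d : ℕ, 1 ≤ d ∧ d < s.toList.length ∧ d ∣ s.toList.length ∧
      (List.replicate (s.toList.length / d) (s.toList.take d)).flatten = s.toList := by
  unfold solve_alt
  rw [List.any_eq_true]
  simp only [PySem.Str.len]
  constructor
  · rintro ⟨d, hmem, hpred⟩
    rw [PySem.List.mem_pyRange_one] at hmem
    obtain ⟨hd1, hdn⟩ := hmem
    rw [Bool.and_eq_true, beq_iff_eq, beq_iff_eq] at hpred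
    obtain ⟨hmod, hrep⟩ := hpred
    have hdnat : d = ((d.toNat : ℕ) : ℤ) := (Int.toNat_of_nonneg (by omega)).symm
    refine ⟨d.toNat, by omega, by omega, ?_, ?_⟩
    · rw [PySem.Int.mod_eq_zero_iff_dvd] at hmod
      rw [hdnat] at hmod
      exact_mod_cast hmod
    · rw [hdnat] at hrep
      rw [PySem.List.slice_to_natCast, PySem.Int.floordiv_natCast] at hrep
      simp only [PySem.List.pyRepeat, Int.toNat_natCast] at hrep
      exact hrep
  · rintro ⟨d, hd1, hdn, hdvd, hrep⟩
    refine ⟨(d : ℤ), ?_, ?_⟩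
    · rw [PySem.List.mem_pyRange_one]
      exact ⟨by exact_mod_cast hd1, by exact_mod_cast hdn⟩
    · rw [Bool.and_eq_true, beq_iff_eq, beq_iff_eq]
      constructor
      · rw [PySem.Int.mod_eq_zero_iff_dvd]; exact_mod_cast hdvd
      · rw [PySem.List.slice_to_natCast, PySem.Int.floordiv_natCast]
        simp only [PySem.List.pyRepeat, Int.toNat_natCast]
        exact hrep

-- ===== VERDICT (by name: the statement is the Claim_ definition above) =====
theorem solve_spec : Claim_equal_solve := by
  intro s _
  unfold Spec_solve
  have hA := solve_iff_rotate s
  have hB := solve_alt_iff_repeat s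
  rcases hbA : solve s with _ | _ <;> rcases hbB : solve_alt s with _ | _ <;> simp_all
  · -- A false, B true: the repetition yields a fixing rotation
    obtain ⟨d, hd1, hdn, hdvd, hrep⟩ := hB
    exact hA d hd1 hdn (rotate_of_flatten_replicate _ d hd1 hdn hrep)
  · -- A true, B false: the fixing rotation yields a repetition by the gcd
    obtain ⟨k, hk1, hkn, hrot⟩ := hA
    have hg := rotate_gcd_self _ k hk1 hkn hrot
    set g := Nat.gcd k s.toList.length with hgdef
    have hgdvd : g ∣ s.toList.length := Nat.gcd_dvd_right _ _
    have hg1 : 1 ≤ g := Nat.gcd_pos_of_pos_left _ hk1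
    have hgn : g < s.toList.length :=
      lt_of_le_of_lt (Nat.le_of_dvd (by omega) (Nat.gcd_dvd_left _ _)) hkn
    have hlen : s.toList.length = (s.toList.length / g) * g := (Nat.div_mul_cancel hgdvd).symm
    have hfix : s.toList.drop g ++ s.toList.take g = s.toList := by
      rw [← List.rotate_eq_drop_append_take (le_of_lt hgn), hg]
    exact hB g hg1 hgn hgdvd
      (eq_flatten_replicate_of_rotate g (s.toList.length / g) s.toList hlen hfix).symm
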